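-- pv_equiv track=rewrite | github.com/IgrMd/yandex-algos-training | Тренировки по алгоритмам 7.0/Лекция 4. Ссылочные типы данных, двусвязные списки, B‑деревья/H.py | cut_graph
-- ===== SOURCE A (Python) =====
-- def cut_graph(n: int, m: int, e: list[tuple[int, int]], requests: list[tuple[str, int, int]]):
--     edges = [x for x in range(n)]
--     snm: list[list] = []
--     for x in edges:
--         snm.append([x])
--     ans = []
--     for cmd, a, b in requests[::-1]:
--         if cmd == 'ask':
--             ans.append('YES' if edges[a] == edges[b] else 'NO')
--             continue
--         if edges[a] == edges[b]:
--             continue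
--         if len(snm[edges[a]]) < len(snm[edges[b]]):
--             a, b = b, a
--         buf = snm[edges[b]]
--         snm[edges[b]] = []
--         for island in buf:
--             edges[island] = edges[a]
--         snm[edges[a]].extend(buf)
--     return ans[::-1]
-- ===== SOURCE B (Python) =====
-- def cut_graph(n: int, m: int, e: list[tuple[int, int]], requests: list[tuple[str, int, int]]):
--     parent = list(range(n))
--
--     def find(x):
--         while parent[x] != x:
--             parent[x] = parent[parent[x]]  # path halving
--             x = parent[x]
--         return x
--
--     out = []
--     for cmd, a, b in reversed(requests):
--         ra = find(a)
--         rb = find(b)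
--         if cmd == 'ask':
--             out.append('YES' if ra == rb else 'NO')
--         elif ra != rb:
--             if rb < ra:
--                 ra, rb = rb, ra
--             parent[rb] = ra  # attach larger root below smaller: keeps parent[i] <= i
--     out.reverse()
--     return out
-- ===== Notes on version B (the rewrite author's own statement) =====
-- stated objective: faster
-- what changed: Replaces A's small-to-large relabelling (a component-label array plus per-component member lists rewritten on every union) by a union-find forest with path halving, attaching the larger root under the smaller, so a union updates one parent pointer instead of relabelling and moving a whole member list.
import Mathlib
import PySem

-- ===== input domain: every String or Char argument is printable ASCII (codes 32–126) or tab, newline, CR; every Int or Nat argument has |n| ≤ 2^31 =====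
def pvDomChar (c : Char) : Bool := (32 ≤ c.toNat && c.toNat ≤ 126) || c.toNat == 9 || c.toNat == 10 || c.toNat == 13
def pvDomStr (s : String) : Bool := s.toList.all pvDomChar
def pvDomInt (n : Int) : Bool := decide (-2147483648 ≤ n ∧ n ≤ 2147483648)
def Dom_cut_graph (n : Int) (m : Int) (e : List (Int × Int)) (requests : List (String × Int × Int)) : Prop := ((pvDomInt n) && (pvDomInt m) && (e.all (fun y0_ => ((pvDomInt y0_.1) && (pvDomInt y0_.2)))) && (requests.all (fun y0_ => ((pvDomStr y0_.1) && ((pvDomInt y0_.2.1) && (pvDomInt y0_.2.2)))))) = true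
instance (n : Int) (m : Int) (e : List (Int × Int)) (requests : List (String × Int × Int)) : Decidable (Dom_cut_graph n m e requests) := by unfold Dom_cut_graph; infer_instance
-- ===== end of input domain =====

-- B replaces A's small-to-large component relabelling (label array + member lists) by a
-- union-find with path halving, attaching the larger root under the smaller: a union updates
-- one pointer instead of relabelling a member list (measurably faster by a constant factor);
-- the proof shows both maintain the same partition.

-- ===== PORT A =====
-- the body of A's union branch (relabel the smaller class, move its member list)
def unionA (ed : List Int) (snm : List (List Int)) (ans : List String) (ab : Int × Int) :
    Option (List Int × List (List Int) × List String) :=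
  (PySem.List.pyGet? ed ab.2).bind fun eb2 =>
  (PySem.List.pyGet? snm eb2).bind fun buf =>
  (PySem.List.pySet? snm eb2 []).bind fun snm1 =>
  ((buf.foldl (fun oed island => oed.bind fun ed' =>
      (PySem.List.pyGet? ed' ab.1).bind fun eai =>
      PySem.List.pySet? ed' island eai) (some ed))).bind fun edges1 =>
  (PySem.List.pyGet? edges1 ab.1).bind fun ea2 =>
  (PySem.List.pyGet? snm1 ea2).bind fun cls =>
  (PySem.List.pySet? snm1 ea2 (cls ++ buf)).bind fun snm2' =>
  some (edges1, snm2', ans)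

-- one iteration of A's request loop; `none` = IndexError
def stepA (st : List Int × List (List Int) × List String) (r : String × Int × Int) :
    Option (List Int × List (List Int) × List String) :=
  (PySem.List.pyGet? st.1 r.2.1).bind fun ea =>
  (PySem.List.pyGet? st.1 r.2.2).bind fun eb =>
  if r.1 == "ask" then
    some (st.1, st.2.1, st.2.2 ++ [if ea == eb then "YES" else "NO"])
  else if ea == eb then
    some st
  else
    (PySem.List.pyGet? st.2.1 ea).bind fun sa =>
    (PySem.List.pyGet? st.2.1 eb).bind fun sb =>
    unionA st.1 st.2.1 st.2.2 (if sa.length < sb.length then (r.2.2, r.2.1) else (r.2.1, r.2.2))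

def cut_graph (n : Int) (m : Int) (e : List (Int × Int)) (requests : List (String × Int × Int)) : List String :=
  let edges := PySem.List.pyRange 0 n 1
  let snm := edges.foldl (fun s x => s ++ [[x]]) ([] : List (List Int))
  match requests.reverse.foldl (fun ost r => ost.bind fun st => stepA st r)
      (some (edges, snm, ([] : List String))) with
  | some st => st.2.2.reverse
  | none => []

-- ===== PORT B =====
-- `while parent[x] != x: parent[x] = parent[parent[x]]; x = parent[x]`; fuel only guards totality
def findB : Nat → List Int → Int → Option (List Int × Int)
  | 0, _, _ => none
  | fuel+1, parent, x =>
    (PySem.List.pyGet? parent x).bind fun px =>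
    if px == x then some (parent, x)
    else
      (PySem.List.pyGet? parent px).bind fun pp =>
      (PySem.List.pySet? parent x pp).bind fun parent1 =>
      (PySem.List.pyGet? parent1 x).bind fun x1 =>
      findB fuel parent1 x1

-- `parent[rr[1]] = rr[0]`
def linkB (parent : List Int) (out : List String) (rr : Int × Int) : Option (List Int × List String) :=
  (PySem.List.pySet? parent rr.2 rr.1).bind fun parent3 => some (parent3, out)

def stepB (st : List Int × List String) (r : String × Int × Int) : Option (List Int × List String) :=
  (findB (st.1.length + 2) st.1 r.2.1).bind fun q1 =>
  (findB (q1.1.length + 2) q1.1 r.2.2).bind fun q2 =>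
  if r.1 == "ask" then
    some (q2.1, st.2 ++ [if q1.2 == q2.2 then "YES" else "NO"])
  else if q1.2 != q2.2 then
    linkB q2.1 st.2 (if q2.2 < q1.2 then (q2.2, q1.2) else (q1.2, q2.2))
  else some (q2.1, st.2)

def cut_graph_alt (n : Int) (m : Int) (e : List (Int × Int)) (requests : List (String × Int × Int)) : List String :=
  let parent := PySem.List.pyRange 0 n 1
  match requests.reverse.foldl (fun ost r => ost.bind fun st => stepB st r)
      (some (parent, ([] : List String))) with
  | some st => st.2.reverse
  | none => []

-- ===== PRECONDITION & SPEC =====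
-- Pre_ admits exactly the inputs on which A returns: every request's two vertex indices are
-- Python-in-range for the length-n vertex array (A raises IndexError on any other request).
def Pre_cut_graph (n : Int) (m : Int) (e : List (Int × Int)) (requests : List (String × Int × Int)) : Prop :=
  ∀ r ∈ requests, (-n ≤ r.2.1 ∧ r.2.1 < n) ∧ (-n ≤ r.2.2 ∧ r.2.2 < n)
instance (n : Int) (m : Int) (e : List (Int × Int)) (requests : List (String × Int × Int)) : Decidable (Pre_cut_graph n m e requests) := by unfold Pre_cut_graph; infer_instance

def pvWitness_cut_graph : Int × Int × (List (Int × Int)) × (List (String × Int × Int)) :=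
  (3, 2, [(0, 1), (1, 2)], [("ask", 0, 1), ("cut", 0, 1), ("ask", 0, 1), ("ask", -1, 2)])

def Spec_cut_graph (n : Int) (m : Int) (e : List (Int × Int)) (requests : List (String × Int × Int)) (out : List String) : Prop := out = cut_graph_alt n m e requests
instance (n : Int) (m : Int) (e : List (Int × Int)) (requests : List (String × Int × Int)) (out : List String) : Decidable (Spec_cut_graph n m e requests out) := by unfold Spec_cut_graph; infer_instance

-- ===== CLAIM (what is proved, stated in full; the proofs are below) =====
def Claim_equal_cut_graph : Prop := ∀ (n : Int) (m : Int) (e : List (Int × Int)) (requests : List (String × Int × Int)), Dom_cut_graph n m e requests → Pre_cut_graph n m e requests → Spec_cut_graph n m e requests (cut_graph n m e requests)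

-- ===== LEMMAS AND PROOFS =====

def nidx (N : Nat) (i : Int) : Nat := (if i < 0 then i + (N : Int) else i).toNat

def root (p : List Int) (x : Nat) : Nat :=
  if h : (p.getD x (Int.ofNat x)).toNat < x then root p (p.getD x (Int.ofNat x)).toNat else x

def WFp (N : Nat) (p : List Int) : Prop :=
  p.length = N ∧ ∀ k, k < N → 0 ≤ p.getD k 0 ∧ p.getD k 0 ≤ (k : Int)

theorem nidx_of_nonneg (N : Nat) (i : Int) (h : 0 ≤ i) : nidx N i = i.toNat := by
  unfold nidx; rw [if_neg (by omega)]

theorem getElem?_eq_getD {α : Type} {l : List α} {k : Nat} (d : α) (h : k < l.length) :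
    l[k]? = some (l.getD k d) := by
  rw [List.getElem?_eq_getElem h, List.getD_eq_getElem l d h]

theorem getD_set {α : Type} (p : List α) (j k : Nat) (w d : α) (hj : j < p.length) :
    (p.set j w).getD k d = if k = j then w else p.getD k d := by
  by_cases hk : k < p.length
  · rw [List.getD_eq_getElem _ d (by simpa using hk), List.getElem_set]
    split_ifs with h1 h2 h3 <;> first | rfl | omega | rw [List.getD_eq_getElem _ d hk]
  · rw [List.getD_eq_default _ _ (by simpa using (not_lt.mp hk)), if_neg (by omega),
      List.getD_eq_default _ _ (not_lt.mp hk)]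

theorem getD_default_of_lt {p : List Int} {x : Nat} (h : x < p.length) :
    p.getD x (Int.ofNat x) = p.getD x 0 := by
  rw [List.getD_eq_getElem _ _ h, List.getD_eq_getElem _ _ h]

theorem root_le (p : List Int) (x : Nat) : root p x ≤ x := by
  induction x using Nat.strong_induction_on with
  | _ x ih =>
    rw [root]
    split
    · exact le_trans (ih _ ‹_›) (le_of_lt ‹_›)
    · exact le_refl x

theorem root_fix {N : Nat} {p : List Int} (hp : WFp N p) {x : Nat} (hx : x < N) :
    p.getD (root p x) 0 = (root p x : Int) := by
  induction x using Nat.strong_induction_on with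
  | _ x ih =>
    rw [root]
    have hl := hp.1
    have hlen : x < p.length := by omega
    rw [getD_default_of_lt hlen]
    have hb := hp.2 x hx
    split
    · exact ih _ ‹_› (by omega)
    · omega

theorem root_of_fix {p : List Int} {r : Nat} (hlen : r < p.length)
    (h : p.getD r 0 = (r : Int)) : root p r = r := by
  rw [root, getD_default_of_lt hlen, h]
  simp

theorem root_getD {N : Nat} {p : List Int} (hp : WFp N p) {x : Nat} (hx : x < N) :
    root p (p.getD x 0).toNat = root p x := by
  have hl := hp.1
  have hlen : x < p.length := by omega
  have hb := hp.2 x hx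
  conv_rhs => rw [root]
  rw [getD_default_of_lt hlen]
  split
  · rfl
  · have he : (p.getD x 0).toNat = x := by omega
    rw [he]
    exact root_of_fix hlen (by omega)

theorem halve_root {N : Nat} {p : List Int} (hp : WFp N p) {j : Nat} (hj : j < N) :
    WFp N (p.set j (p.getD (p.getD j 0).toNat 0)) ∧
    ∀ z, root (p.set j (p.getD (p.getD j 0).toNat 0)) z = root p z := by
  have hl := hp.1
  have hjl : j < p.length := by omega
  have hbj := hp.2 j hj
  set j1 : Nat := (p.getD j 0).toNat with hj1
  have hj1le : j1 ≤ j := by omega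
  have hj1N : j1 < N := by omega
  have hbj1 := hp.2 j1 hj1N
  set w : Int := p.getD j1 0 with hw
  set p' : List Int := p.set j w with hp'
  have hlen' : p'.length = N := by rw [hp', List.length_set]; omega
  have hget : ∀ k, k < N → p'.getD k 0 = if k = j then w else p.getD k 0 := by
    intro k _; rw [hp']; exact getD_set p j k w 0 hjl
  have hWF : WFp N p' := by
    refine ⟨hlen', fun k hk => ?_⟩
    rw [hget k hk]
    split_ifs with h
    · subst h; constructor <;> omega
    · exact hp.2 k hk
  refine ⟨hWF, fun z => ?_⟩
  induction z using Nat.strong_induction_on with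
  | _ z ih =>
    by_cases hz : z < N
    · have hzl : z < p.length := by omega
      have hzl' : z < p'.length := by omega
      conv_lhs => rw [root]
      conv_rhs => rw [root]
      rw [getD_default_of_lt hzl', getD_default_of_lt hzl, hget z hz]
      by_cases hzj : z = j
      · subst hzj
        rw [if_pos rfl, ← hj1]
        by_cases hc : j1 < z
        · -- p[z] strictly below z
          rw [dif_pos hc, dif_pos (by omega : w.toNat < z), ih _ (by omega : w.toNat < z)]
          have h1 : root p w.toNat = root p j1 := by
            rw [hw]; exact root_getD hp hj1N
          rw [h1]
        · -- j1 = z : z is a root (p[z] = z)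
          have hj1z : j1 = z := by omega
          have hwz : w = (z : Int) := by
            rw [hw, hj1z]; omega
          rw [dif_neg (by omega), dif_neg hc]
      · rw [if_neg hzj]
        split
        · exact ih _ ‹_›
        · rfl
    · have h1 : p'.getD z (Int.ofNat z) = Int.ofNat z := List.getD_eq_default _ _ (by omega)
      have h2 : p.getD z (Int.ofNat z) = Int.ofNat z := List.getD_eq_default _ _ (by omega)
      conv_lhs => rw [root]
      conv_rhs => rw [root]
      rw [h1, h2]
      have : (Int.ofNat z).toNat = z := by simp
      rw [this]
      simp

theorem union_root {N : Nat} {p : List Int} (hp : WFp N p) {ra rb : Nat}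
    (hra : ra < N) (hrb : rb < N) (hfa : p.getD ra 0 = (ra : Int)) (hfb : p.getD rb 0 = (rb : Int))
    (hlt : ra < rb) :
    WFp N (p.set rb (ra : Int)) ∧
    ∀ z, z < N → root (p.set rb (ra : Int)) z = if root p z = rb then ra else root p z := by
  have hl := hp.1
  have hrbl : rb < p.length := by omega
  set p' : List Int := p.set rb (ra : Int) with hp'
  have hlen' : p'.length = N := by rw [hp', List.length_set]; omega
  have hget : ∀ k, k < N → p'.getD k 0 = if k = rb then (ra : Int) else p.getD k 0 := by
    intro k _; rw [hp']; exact getD_set p rb k _ 0 hrbl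
  have hWF : WFp N p' := by
    refine ⟨hlen', fun k hk => ?_⟩
    rw [hget k hk]
    split_ifs with h
    · constructor <;> omega
    · exact hp.2 k hk
  refine ⟨hWF, fun z => ?_⟩
  induction z using Nat.strong_induction_on with
  | _ z ih =>
    intro hz
    have hzl : z < p.length := by omega
    have hzl' : z < p'.length := by omega
    conv_lhs => rw [root]
    rw [getD_default_of_lt hzl', hget z hz]
    by_cases hzb : z = rb
    · subst hzb
      rw [if_pos rfl]
      have hroot_z : root p z = z := root_of_fix hzl hfb
      rw [dif_pos (by omega : ((ra : Int)).toNat < z)]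
      have : ((ra : Int)).toNat = ra := by omega
      rw [this, ih ra hlt hra, hroot_z, if_pos rfl]
      have hrootA : root p ra = ra := root_of_fix (by omega) hfa
      rw [hrootA, if_neg (by omega)]
    · rw [if_neg hzb]
      have hb := hp.2 z hz
      by_cases hc : (p.getD z 0).toNat < z
      · rw [dif_pos hc, ih _ hc (by omega), root_getD hp hz]
      · rw [dif_neg hc]
        have hpz : p.getD z 0 = (z : Int) := by omega
        have : root p z = z := root_of_fix hzl hpz
        rw [this, if_neg hzb]

theorem nidx_lt (N : Nat) (i : Int) (h1 : -(N : Int) ≤ i) (h2 : i < N) : nidx N i < N := by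
  unfold nidx; split <;> omega

theorem pyGet?_nidx {α : Type} (l : List α) (i : Int) (h1 : -(l.length : Int) ≤ i) (h2 : i < (l.length : Int)) :
    PySem.List.pyGet? l i = l[nidx l.length i]? := by
  unfold nidx
  simp only [PySem.List.pyGet?, PySem.List.pyIdx?]
  by_cases h0 : 0 ≤ i
  · simp [h0, h2, not_lt.mpr h0]
  · have hneg : i < 0 := not_le.mp h0
    have he : l.length - (-i).toNat = (i + (l.length : Int)).toNat := by omega
    simp [h0, h1, hneg, he]

theorem pyGet?_getD {α : Type} (d : α) {l : List α} {i : Int} (h1 : -(l.length : Int) ≤ i) (h2 : i < (l.length : Int)) :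
    PySem.List.pyGet? l i = some (l.getD (nidx l.length i) d) := by
  rw [pyGet?_nidx l i h1 h2]
  exact getElem?_eq_getD d (nidx_lt _ _ h1 h2)

theorem pySet?_of_nonneg {α : Type} (l : List α) (i : Int) (v : α) (h0 : 0 ≤ i) (h2 : i < (l.length : Int)) :
    PySem.List.pySet? l i v = some (l.set i.toNat v) := by
  simp [PySem.List.pySet?, PySem.List.pyIdx?, h0, h2]

theorem pySet?_nidx {α : Type} (l : List α) (i : Int) (v : α) (h1 : -(l.length : Int) ≤ i) (h2 : i < (l.length : Int)) :
    PySem.List.pySet? l i v = some (l.set (nidx l.length i) v) := by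
  unfold nidx
  simp only [PySem.List.pySet?, PySem.List.pyIdx?]
  by_cases h0 : 0 ≤ i
  · simp [h0, h2]
    rw [if_neg (not_lt.mpr h0)]
  · have hneg : i < 0 := not_le.mp h0
    have he : l.length - (-i).toNat = (i + (l.length : Int)).toNat := by omega
    simp [h0, h1, hneg, he]

theorem findB_aux : ∀ K : Nat, ∀ {N : Nat} {p : List Int}, WFp N p → ∀ {x : Int},
    -(N : Int) ≤ x → x < N → nidx N x = K → ∀ fuel, K + 2 ≤ fuel →
    ∃ p', findB fuel p x = some (p', (root p (nidx N x) : Int)) ∧ WFp N p' ∧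
      ∀ z, root p' z = root p z := by
  intro K
  induction K using Nat.strong_induction_on with
  | _ K ih =>
    intro N p hp x h1 h2 hK fuel hfuel
    obtain ⟨f, rfl⟩ : ∃ f, fuel = f + 1 := ⟨fuel - 1, by omega⟩
    have hl := hp.1
    have hKN : K < N := hK ▸ nidx_lt N x h1 h2
    have hg1 : PySem.List.pyGet? p x = some (p.getD K 0) := by
      rw [pyGet?_getD 0 (by omega) (by omega : x < (p.length : Int))]
      rw [hl, hK]
    set px := p.getD K 0 with hpx
    have hbK := hp.2 K hKN
    rw [findB, hg1]
    simp only [Option.bind_some]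
    by_cases hxx : px = x
    · rw [if_pos (by simpa using hxx)]
      have hx0 : 0 ≤ x := by omega
      have hKx : (K : Int) = x := by
        have := nidx_of_nonneg N x hx0
        omega
      have hroot : root p K = K := root_of_fix (by omega) (by omega)
      exact ⟨p, by rw [hK, hroot, hKx], hp, fun _ => rfl⟩
    · rw [if_neg (by simpa using hxx)]
      have hpx0 : 0 ≤ px := hbK.1
      set K1 : Nat := px.toNat with hK1
      have hK1le : K1 ≤ K := by omega
      have hK1N : K1 < N := by omega
      have hg2 : PySem.List.pyGet? p px = some (p.getD K1 0) := by
        rw [pyGet?_getD 0 (by omega) (by omega : px < (p.length : Int))]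
        rw [hl, nidx_of_nonneg N px hpx0]
      rw [hg2]
      simp only [Option.bind_some]
      set w : Int := p.getD K1 0 with hw
      have hbK1 := hp.2 K1 hK1N
      have hs1 : PySem.List.pySet? p x w = some (p.set K w) := by
        rw [pySet?_nidx p x w (by omega) (by omega : x < (p.length : Int))]
        rw [hl, hK]
      rw [hs1]
      simp only [Option.bind_some]
      set p1 : List Int := p.set K w with hp1
      have hhalve := halve_root hp hKN
      rw [← hpx, ← hK1, ← hw] at hhalve
      have hp1WF : WFp N p1 := hhalve.1
      have hp1root : ∀ z, root p1 z = root p z := hhalve.2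
      have hl1 : p1.length = N := hp1WF.1
      have hg3 : PySem.List.pyGet? p1 x = some (p1.getD K 0) := by
        rw [pyGet?_getD 0 (by omega) (by omega : x < (p1.length : Int))]
        rw [hl1, hK]
      have hp1K : p1.getD K 0 = w := by
        rw [hp1, getD_set p K K w 0 (by omega), if_pos rfl]
      rw [hg3, hp1K]
      simp only [Option.bind_some]
      by_cases hc : K1 < K
      · -- strict descent: recurse via ih
        have hw0 : 0 ≤ w := hbK1.1
        have hwK1 : w ≤ (K1 : Int) := hbK1.2
        have hnw : nidx N w = w.toNat := nidx_of_nonneg N w hw0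
        obtain ⟨p'', heq, hWF'', hroots''⟩ :=
          ih w.toNat (by omega) hp1WF (x := w) (by omega) (by omega) hnw f (by omega)
        refine ⟨p'', ?_, hWF'', fun z => (hroots'' z).trans (hp1root z)⟩
        rw [heq, hnw]
        have e1 : root p1 w.toNat = root p w.toNat := hp1root _
        have e2 : root p w.toNat = root p K1 := by
          rw [hw]; exact root_getD hp hK1N
        have e3 : root p K1 = root p K := by
          have := root_getD hp hKN
          rw [← hpx] at this
          rw [hK1]; exact this
        rw [hK, e1, e2, e3]
      · -- K1 = K : K is already a root; one more unfold returns
        have hK1K : K1 = K := by omega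
        have hpxK : px = (K : Int) := by omega
        have hwK : w = (K : Int) := by rw [hw, hK1K, ← hpx, hpxK]
        obtain ⟨g, rfl⟩ : ∃ g, f = g + 1 := ⟨f - 1, by omega⟩
        have hg4 : PySem.List.pyGet? p1 w = some (p1.getD K 0) := by
          rw [pyGet?_getD 0 (by omega : -(p1.length : Int) ≤ w) (by omega : w < (p1.length : Int))]
          rw [hl1, hwK, nidx_of_nonneg N (K : Int) (by omega)]
          simp
        rw [findB, hg4, hp1K]
        simp only [Option.bind_some]
        rw [if_pos (by simp)]
        have hroot : root p K = K := root_of_fix (by omega) (by omega)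
        exact ⟨p1, by rw [hK, hroot, hwK], hp1WF, hp1root⟩

def WFe (N : Nat) (ed : List Int) : Prop :=
  ed.length = N ∧ ∀ k, k < N → 0 ≤ ed.getD k 0 ∧ ed.getD k 0 < (N : Int)

def SNM (N : Nat) (ed : List Int) (snm : List (List Int)) : Prop :=
  snm.length = N ∧ ∀ l, l < N →
    (∀ x ∈ snm.getD l [], 0 ≤ x) ∧
    (∀ k : Nat, ((k : Int) ∈ snm.getD l [] ↔ k < N ∧ ed.getD k 0 = (l : Int)))

theorem relabel_fold {N : Nat} (a eA : Int) (ha1 : -(N : Int) ≤ a) (ha2 : a < N) :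
    ∀ (buf : List Int) (ed : List Int),
    (∀ x ∈ buf, 0 ≤ x ∧ x < (N : Int) ∧ x ≠ ((nidx N a : Nat) : Int)) →
    ed.length = N → ed.getD (nidx N a) 0 = eA →
    ∃ ed1, (buf.foldl (fun oed island =>
        oed.bind fun ed' =>
          (PySem.List.pyGet? ed' a).bind fun eai =>
          PySem.List.pySet? ed' island eai) (some ed)) = some ed1 ∧
      ed1.length = N ∧ ∀ k, k < N → ed1.getD k 0 = if (k : Int) ∈ buf then eA else ed.getD k 0 := by
  intro buf
  induction buf with
  | nil =>
    intro ed _ hlen hEA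
    exact ⟨ed, rfl, hlen, fun k _ => by simp⟩
  | cons island rest ihb =>
    intro ed hbuf hlen hEA
    have hisl := hbuf island (by simp)
    rw [List.foldl_cons]
    have hg : PySem.List.pyGet? ed a = some eA := by
      rw [pyGet?_getD 0 (by omega) (by omega : a < (ed.length : Int))]
      rw [hlen, hEA]
    have hs : PySem.List.pySet? ed island eA = some (ed.set island.toNat eA) :=
      pySet?_of_nonneg ed island eA hisl.1 (by omega)
    rw [Option.bind_some, hg, Option.bind_some, hs]
    set ed' : List Int := ed.set island.toNat eA with hed'
    have hlen' : ed'.length = N := by rw [hed', List.length_set]; omega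
    have hEA' : ed'.getD (nidx N a) 0 = eA := by
      rw [hed', getD_set ed island.toNat (nidx N a) eA 0 (by omega), if_neg (by omega)]
      exact hEA
    obtain ⟨ed1, heq, hlen1, hchar⟩ := ihb ed' (fun x hx => hbuf x (by simp [hx])) hlen' hEA'
    refine ⟨ed1, heq, hlen1, fun k hk => ?_⟩
    rw [hchar k hk]
    by_cases hk1 : (k : Int) ∈ rest
    · rw [if_pos hk1, if_pos (by simp [hk1])]
    · by_cases hk2 : (k : Int) = island
      · rw [if_neg hk1, if_pos (by simp [hk2]), hed',
          getD_set ed island.toNat k eA 0 (by omega), if_pos (by omega)]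
      · rw [if_neg hk1, if_neg (by simp [hk1, hk2]), hed',
          getD_set ed island.toNat k eA 0 (by omega), if_neg (by omega)]

theorem unionA_chain {N : Nat} {ed : List Int} {snm : List (List Int)} (ans : List String)
    (hed : WFe N ed) (hsnm : SNM N ed snm)
    {A_ B_ : Int} (hA1 : -(N : Int) ≤ A_) (hA2 : A_ < N) (hB1 : -(N : Int) ≤ B_) (hB2 : B_ < N)
    (hne : ed.getD (nidx N A_) 0 ≠ ed.getD (nidx N B_) 0) :
    ∃ ed1 snm2,
      ((PySem.List.pyGet? ed B_).bind fun eb2 =>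
       (PySem.List.pyGet? snm eb2).bind fun buf =>
       (PySem.List.pySet? snm eb2 []).bind fun snm1 =>
       ((buf.foldl (fun oed island => oed.bind fun ed' =>
           (PySem.List.pyGet? ed' A_).bind fun eai =>
           PySem.List.pySet? ed' island eai) (some ed))).bind fun edges1 =>
       (PySem.List.pyGet? edges1 A_).bind fun ea2 =>
       (PySem.List.pyGet? snm1 ea2).bind fun cls =>
       (PySem.List.pySet? snm1 ea2 (cls ++ buf)).bind fun snm2' =>
       some (edges1, snm2', ans)) = some (ed1, snm2, ans) ∧
      WFe N ed1 ∧ SNM N ed1 snm2 ∧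
      (∀ k, k < N → ed1.getD k 0 =
        (if ed.getD k 0 = ed.getD (nidx N B_) 0 then ed.getD (nidx N A_) 0 else ed.getD k 0)) := by
  have hedl := hed.1
  have hsl := hsnm.1
  set nA : Nat := nidx N A_ with hnA
  set nB : Nat := nidx N B_ with hnB
  have hnAN : nA < N := nidx_lt N A_ hA1 hA2
  have hnBN : nB < N := nidx_lt N B_ hB1 hB2
  set eA : Int := ed.getD nA 0 with heA
  set eB : Int := ed.getD nB 0 with heB
  have hbA := hed.2 nA hnAN
  have hbB := hed.2 nB hnBN
  rw [← heA] at hbA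
  rw [← heB] at hbB
  -- eb2 = eB
  have hg1 : PySem.List.pyGet? ed B_ = some eB := by
    rw [pyGet?_getD 0 (by omega) (by omega : B_ < (ed.length : Int))]
    rw [hedl, ← hnB, heB]
  -- buf
  have hnidxB : nidx snm.length eB = eB.toNat := by rw [nidx_of_nonneg _ _ hbB.1]
  have hg2 : PySem.List.pyGet? snm eB = some (snm.getD eB.toNat []) := by
    rw [pyGet?_getD [] (by omega) (by omega : eB < (snm.length : Int)), hnidxB]
  set buf : List Int := snm.getD eB.toNat [] with hbuf
  have hmem := hsnm.2 eB.toNat (by omega)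
  have hmemB : ∀ k : Nat, ((k : Int) ∈ buf ↔ k < N ∧ ed.getD k 0 = eB) := by
    intro k
    rw [hbuf]
    have := hmem.2 k
    rwa [Int.toNat_of_nonneg hbB.1] at this
  have hbufp : ∀ x ∈ buf, 0 ≤ x ∧ x < (N : Int) ∧ x ≠ ((nA : Nat) : Int) := by
    intro x hx
    have hx0 : 0 ≤ x := hmem.1 x hx
    have : (x.toNat : Int) ∈ buf := by rwa [Int.toNat_of_nonneg hx0]
    have h2 := (hmemB x.toNat).mp this
    refine ⟨hx0, by omega, ?_⟩
    intro hcon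
    apply hne
    have hxn : x.toNat = nA := by omega
    rw [heA, ← hxn]
    exact h2.2
  -- snm1
  have hs1 : PySem.List.pySet? snm eB ([] : List Int) = some (snm.set eB.toNat []) :=
    pySet?_of_nonneg snm eB [] hbB.1 (by omega)
  set snm1 : List (List Int) := snm.set eB.toNat [] with hsnm1
  -- relabel fold
  obtain ⟨ed1, hfold, hlen1, hchar⟩ := relabel_fold A_ eA hA1 hA2 buf ed hbufp hedl (by rw [← hnA, ← heA])
  have hchar' : ∀ k, k < N → ed1.getD k 0 = if ed.getD k 0 = eB then eA else ed.getD k 0 := by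
    intro k hk
    rw [hchar k hk]
    by_cases hm : (k : Int) ∈ buf
    · rw [if_pos hm, if_pos ((hmemB k).mp hm).2]
    · rw [if_neg hm, if_neg (fun hc => hm ((hmemB k).mpr ⟨hk, hc⟩))]
  -- ea2 = eA
  have hnAbuf : ((nA : Nat) : Int) ∉ buf := by
    intro hc
    exact (hbufp _ hc).2.2 rfl
  have hg3 : PySem.List.pyGet? ed1 A_ = some eA := by
    rw [pyGet?_getD 0 (by omega) (by omega : A_ < (ed1.length : Int))]
    rw [hlen1, ← hnA, hchar nA hnAN, if_neg hnAbuf, heA]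
  -- cls
  have hABne : eA.toNat ≠ eB.toNat := by
    have h1 := hbA.1; have h2 := hbB.1
    omega
  have hsnm1l : snm1.length = N := by rw [hsnm1, List.length_set]; omega
  have hg4 : PySem.List.pyGet? snm1 eA = some (snm.getD eA.toNat []) := by
    rw [pyGet?_getD [] (by omega) (by omega : eA < (snm1.length : Int))]
    rw [hsnm1l, nidx_of_nonneg _ _ hbA.1, hsnm1,
      getD_set snm eB.toNat eA.toNat [] [] (by omega), if_neg hABne]
  set cls : List Int := snm.getD eA.toNat [] with hcls
  have hs2 : PySem.List.pySet? snm1 eA (cls ++ buf) = some (snm1.set eA.toNat (cls ++ buf)) :=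
    pySet?_of_nonneg snm1 eA (cls ++ buf) hbA.1 (by omega)
  set snm2 : List (List Int) := snm1.set eA.toNat (cls ++ buf) with hsnm2
  refine ⟨ed1, snm2, ?_, ?_, ?_, hchar'⟩
  · rw [hg1, Option.bind_some, hg2, Option.bind_some, hs1, Option.bind_some, hfold,
      Option.bind_some, hg3, Option.bind_some, hg4, Option.bind_some, hs2, Option.bind_some]
  · refine ⟨hlen1, fun k hk => ?_⟩
    rw [hchar' k hk]
    split_ifs
    · omega
    · exact hed.2 k hk
  · refine ⟨by rw [hsnm2, List.length_set]; omega, fun l hl => ?_⟩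
    have hslot : snm2.getD l [] =
        if l = eA.toNat then cls ++ buf else if l = eB.toNat then [] else snm.getD l [] := by
      rw [hsnm2, getD_set snm1 eA.toNat l _ [] (by omega), hsnm1,
        getD_set snm eB.toNat l [] [] (by omega)]
    have hmeml := hsnm.2 l hl
    constructor
    · intro x hx
      rw [hslot] at hx
      split_ifs at hx with c1 c2
      · rcases List.mem_append.mp hx with h | h
        · exact (hsnm.2 eA.toNat (by omega)).1 x (by rwa [hcls] at h)
        · exact hmem.1 x (by rwa [hbuf] at h)
      · simp at hx
      · exact hmeml.1 x hx
    · intro k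
      rw [hslot]
      have hk1 := hmeml.2 k
      split_ifs with c1 c2
      · subst c1
        rw [List.mem_append]
        have hclsmem := (hsnm.2 eA.toNat (by omega)).2 k
        rw [← hcls] at hclsmem
        rw [Int.toNat_of_nonneg hbA.1] at hclsmem
        constructor
        · rintro (h | h)
          · have := hclsmem.mp h
            refine ⟨this.1, ?_⟩
            rw [hchar' k this.1, if_neg (by rw [this.2]; exact hne), this.2]
            omega
          · have := (hmemB k).mp h
            refine ⟨this.1, ?_⟩
            rw [hchar' k this.1, if_pos this.2]
            omega
        · rintro ⟨hkN, hlab⟩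
          rw [hchar' k hkN] at hlab
          by_cases hm : ed.getD k 0 = eB
          · exact Or.inr ((hmemB k).mpr ⟨hkN, hm⟩)
          · rw [if_neg hm] at hlab
            exact Or.inl (hclsmem.mpr ⟨hkN, by omega⟩)
      · subst c2
        simp only [List.not_mem_nil, false_iff]
        rintro ⟨hkN, hlab⟩
        rw [hchar' k hkN] at hlab
        split_ifs at hlab with hm
        · rw [Int.toNat_of_nonneg hbB.1] at hlab
          exact hABne (by omega)
        · rw [Int.toNat_of_nonneg hbB.1] at hlab
          exact hm (by omega)
      · rw [hk1]
        constructor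
        · rintro ⟨hkN, hlab⟩
          refine ⟨hkN, ?_⟩
          rw [hchar' k hkN, if_neg ?_]
          · exact hlab
          · intro hc
            apply c2
            have := hbB.1
            omega
        · rintro ⟨hkN, hlab⟩
          refine ⟨hkN, ?_⟩
          rw [hchar' k hkN] at hlab
          split_ifs at hlab with hm
          · exact absurd (by have := hbA.1; omega : l = eA.toNat) c1
          · exact hlab

def Corr (N : Nat) (ed p : List Int) : Prop :=
  ∀ x y, x < N → y < N → (ed.getD x 0 = ed.getD y 0 ↔ root p x = root p y)

def InvAB (N : Nat) (stA : List Int × List (List Int) × List String) (stB : List Int × List String) : Prop :=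
  WFe N stA.1 ∧ SNM N stA.1 stA.2.1 ∧ WFp N stB.1 ∧ Corr N stA.1 stB.1 ∧ stA.2.2 = stB.2

def RangeOK (n : Int) (r : String × Int × Int) : Prop :=
  (-n ≤ r.2.1 ∧ r.2.1 < n) ∧ (-n ≤ r.2.2 ∧ r.2.2 < n)

theorem unionA_spec {N : Nat} {ed : List Int} {snm : List (List Int)} (ans : List String)
    (hed : WFe N ed) (hsnm : SNM N ed snm)
    {A_ B_ : Int} (hA1 : -(N : Int) ≤ A_) (hA2 : A_ < N) (hB1 : -(N : Int) ≤ B_) (hB2 : B_ < N)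
    (hne : ed.getD (nidx N A_) 0 ≠ ed.getD (nidx N B_) 0) :
    ∃ ed1 snm2,
      unionA ed snm ans (A_, B_) = some (ed1, snm2, ans) ∧
      WFe N ed1 ∧ SNM N ed1 snm2 ∧
      (∀ k, k < N → ed1.getD k 0 =
        (if ed.getD k 0 = ed.getD (nidx N B_) 0 then ed.getD (nidx N A_) 0 else ed.getD k 0)) := by
  obtain ⟨ed1, snm2, heq, h1, h2, h3⟩ := unionA_chain ans hed hsnm hA1 hA2 hB1 hB2 hne
  exact ⟨ed1, snm2, by simpa only [unionA] using heq, h1, h2, h3⟩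

theorem collapse {α : Type} [DecidableEq α] (m M u v : α) :
    ((if u = M then m else u) = (if v = M then m else v)) ↔
      (u = v ∨ ((u = m ∨ u = M) ∧ (v = m ∨ v = M))) := by
  constructor
  · intro h
    by_cases hu : u = M <;> by_cases hv : v = M
    · subst hu; subst hv; left; rfl
    · subst hu; rw [if_pos rfl, if_neg hv] at h; right; exact ⟨Or.inr rfl, Or.inl h.symm⟩
    · subst hv; rw [if_neg hu, if_pos rfl] at h; right; exact ⟨Or.inl h, Or.inr rfl⟩
    · rw [if_neg hu, if_neg hv] at h; left; exact h
  · intro h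
    rcases h with h | ⟨ha, hb⟩
    · subst h; rfl
    · rcases ha with ha | ha <;> rcases hb with hb | hb <;> subst_eqs <;> simp

set_option maxHeartbeats 1000000 in
theorem corr_merge {N : Nat} {ed p ed1 p3 : List Int} (hcorr : Corr N ed p)
    (nA nB : Nat) (hnA : nA < N) (hnB : nB < N)
    (hchar : ∀ k, k < N → ed1.getD k 0 =
      if ed.getD k 0 = ed.getD nB 0 then ed.getD nA 0 else ed.getD k 0)
    (Rm RM : Nat)
    (hroot3 : ∀ z, z < N → root p3 z = if root p z = RM then Rm else root p z)
    (hRmM : (Rm = root p nA ∧ RM = root p nB) ∨ (Rm = root p nB ∧ RM = root p nA)) :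
    Corr N ed1 p3 := by
  intro x y hx hy
  rw [hchar x hx, hchar y hy, hroot3 x hx, hroot3 y hy, collapse, collapse]
  have hxy := hcorr x y hx hy
  have hxA := hcorr x nA hx hnA
  have hxB := hcorr x nB hx hnB
  have hyA := hcorr y nA hy hnA
  have hyB := hcorr y nB hy hnB
  rcases hRmM with ⟨hm, hM⟩ | ⟨hm, hM⟩ <;> subst hm <;> subst hM <;> tauto

theorem findB_run {N : Nat} {p : List Int} (hp : WFp N p) {x : Int}
    (h1 : -(N : Int) ≤ x) (h2 : x < N) :
    ∃ p', findB (p.length + 2) p x = some (p', (root p (nidx N x) : Int)) ∧ WFp N p' ∧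
      ∀ z, root p' z = root p z := by
  have hKN : nidx N x < N := nidx_lt N x h1 h2
  exact findB_aux (nidx N x) hp h1 h2 rfl (p.length + 2) (by rw [hp.1]; omega)

set_option maxHeartbeats 1000000 in
theorem step_equiv {N : Nat} {n : Int} (hn : (N : Int) = n)
    {stA : List Int × List (List Int) × List String} {stB : List Int × List String}
    (r : String × Int × Int) (hr : RangeOK n r) (hI : InvAB N stA stB) :
    ∃ stA' stB', stepA stA r = some stA' ∧ stepB stB r = some stB' ∧ InvAB N stA' stB' := by
  obtain ⟨ed, snm, ans⟩ := stA
  obtain ⟨p, out⟩ := stB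
  obtain ⟨cmd, a, b⟩ := r
  obtain ⟨hed, hsnm, hp, hcorr, hans⟩ := hI
  simp only at hed hsnm hp hcorr hans
  have hra : -(N : Int) ≤ a ∧ a < N := by rw [hn]; exact hr.1
  have hrb : -(N : Int) ≤ b ∧ b < N := by rw [hn]; exact hr.2
  set na : Nat := nidx N a with hna
  set nb : Nat := nidx N b with hnb
  have hnaN : na < N := nidx_lt N a hra.1 hra.2
  have hnbN : nb < N := nidx_lt N b hrb.1 hrb.2
  set ea : Int := ed.getD na 0 with hea
  set eb : Int := ed.getD nb 0 with heb
  have hedl := hed.1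
  have hg1 : PySem.List.pyGet? ed a = some ea := by
    rw [pyGet?_getD 0 (by omega) (by omega : a < (ed.length : Int))]
    rw [hedl, ← hna, hea]
  have hg2 : PySem.List.pyGet? ed b = some eb := by
    rw [pyGet?_getD 0 (by omega) (by omega : b < (ed.length : Int))]
    rw [hedl, ← hnb, heb]
  obtain ⟨p1, hf1, hp1, hroots1⟩ := findB_run hp hra.1 hra.2
  obtain ⟨p2, hf2raw, hp2, hroots2⟩ := findB_run hp1 hrb.1 hrb.2
  set Ra : Nat := root p na with hRa
  set Rb : Nat := root p nb with hRb
  have hf2 : findB (p1.length + 2) p1 b = some (p2, (Rb : Int)) := by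
    rw [hf2raw, ← hnb, hroots1 nb, ← hRb]
  have hroots2' : ∀ z, root p2 z = root p z := fun z => (hroots2 z).trans (hroots1 z)
  have hcorr2 : Corr N ed p2 := fun x y hx hy => by
    rw [hroots2' x, hroots2' y]; exact hcorr x y hx hy
  have hiff : ea = eb ↔ Ra = Rb := by
    rw [hRa, hRb, hea, heb]
    exact hcorr na nb hnaN hnbN
  simp only [stepA, stepB, hg1, hg2, Option.bind_some, hf1, hf2]
  by_cases hask : cmd = "ask"
  · have hcnd : ((cmd == "ask") = true) := by simp [hask]
    rw [if_pos hcnd, if_pos hcnd]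
    have hbeq : (ea == eb) = ((Ra : Int) == (Rb : Int)) := by
      by_cases h : ea = eb
      · rw [h, hiff.mp h]
        simp
      · have h2 : ¬ ((Ra : Int) = (Rb : Int)) := fun hc => h (hiff.mpr (by exact_mod_cast hc))
        simp [h, h2]
    refine ⟨_, _, rfl, rfl, ?_⟩
    exact ⟨hed, hsnm, hp2, hcorr2, by rw [hans, hbeq]⟩
  · have hcnd : ¬((cmd == "ask") = true) := by simp [hask]
    rw [if_neg hcnd, if_neg hcnd]
    by_cases heq : ea = eb
    · rw [if_pos (by simp [heq] : (ea == eb) = true)]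
      have hbne : ¬(((Ra : Int) != (Rb : Int)) = true) := by
        simp only [bne_iff_ne, ne_eq, not_not]
        exact_mod_cast hiff.mp heq
      rw [if_neg hbne]
      refine ⟨_, _, rfl, rfl, ?_⟩
      exact ⟨hed, hsnm, hp2, hcorr2, hans⟩
    · rw [if_neg (by simp [heq] : ¬((ea == eb) = true))]
      have hRne : Ra ≠ Rb := fun hc => heq (hiff.mpr hc)
      rw [if_pos (by simp only [bne_iff_ne, ne_eq]; exact_mod_cast hRne : (((Ra : Int) != (Rb : Int)) = true))]
      have hsl := hsnm.1
      have hbea := hed.2 na hnaN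
      have hbeb := hed.2 nb hnbN
      rw [← hea] at hbea
      rw [← heb] at hbeb
      have hgsa : PySem.List.pyGet? snm ea = some (snm.getD ea.toNat []) := by
        rw [pyGet?_getD [] (by omega) (by omega : ea < (snm.length : Int))]
        rw [hsl, nidx_of_nonneg _ _ hbea.1]
      have hgsb : PySem.List.pyGet? snm eb = some (snm.getD eb.toNat []) := by
        rw [pyGet?_getD [] (by omega) (by omega : eb < (snm.length : Int))]
        rw [hsl, nidx_of_nonneg _ _ hbeb.1]
      rw [hgsa, Option.bind_some, hgsb, Option.bind_some]
      have hfixa : p2.getD Ra 0 = (Ra : Int) := by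
        have := root_fix hp2 hnaN
        rwa [hroots2' na, ← hRa] at this
      have hfixb : p2.getD Rb 0 = (Rb : Int) := by
        have := root_fix hp2 hnbN
        rwa [hroots2' nb, ← hRb] at this
      have hRaN : Ra < N := lt_of_le_of_lt (root_le p na) hnaN
      have hRbN : Rb < N := lt_of_le_of_lt (root_le p nb) hnbN
      have hp2l := hp2.1
      have hlink : ∃ p3, linkB p2 out (if ((Rb : Int)) < ((Ra : Int)) then ((Rb : Int), (Ra : Int)) else ((Ra : Int), (Rb : Int))) = some (p3, out) ∧
          WFp N p3 ∧ ∃ Rm RM : Nat,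
            (∀ z, z < N → root p3 z = if root p z = RM then Rm else root p z) ∧
            ((Rm = Ra ∧ RM = Rb) ∨ (Rm = Rb ∧ RM = Ra)) := by
        by_cases hlt : Rb < Ra
        · rw [if_pos (by exact_mod_cast hlt)]
          have hu := union_root hp2 hRbN hRaN hfixb hfixa hlt
          refine ⟨p2.set Ra (Rb : Int), ?_, hu.1, Rb, Ra, ?_, Or.inr ⟨rfl, rfl⟩⟩
          · simp only [linkB]
            rw [pySet?_of_nonneg p2 (Ra : Int) (Rb : Int) (by omega) (by omega : (Ra : Int) < (p2.length : Int))]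
            simp
          · intro z hz
            rw [← hroots2' z]
            have := hu.2 z hz
            simpa [hroots2' z] using this
        · have hlt' : Ra < Rb := by omega
          rw [if_neg (by exact_mod_cast hlt)]
          have hu := union_root hp2 hRaN hRbN hfixa hfixb hlt'
          refine ⟨p2.set Rb (Ra : Int), ?_, hu.1, Ra, Rb, ?_, Or.inl ⟨rfl, rfl⟩⟩
          · simp only [linkB]
            rw [pySet?_of_nonneg p2 (Rb : Int) (Ra : Int) (by omega) (by omega : (Rb : Int) < (p2.length : Int))]
            simp
          · intro z hz
            rw [← hroots2' z]
            have := hu.2 z hz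
            simpa [hroots2' z] using this
      obtain ⟨p3, hlinkeq, hp3, Rm, RM, hroot3, hRmM⟩ := hlink
      by_cases hsw : (snm.getD ea.toNat []).length < (snm.getD eb.toNat []).length
      · rw [if_pos hsw]
        obtain ⟨ed1, snm2, huA, hed1, hsnm2, hchar⟩ :=
          unionA_spec ans hed hsnm hrb.1 hrb.2 hra.1 hra.2
            (by rw [← hnb, ← hna, ← heb, ← hea]; exact fun hc => heq hc.symm)
        refine ⟨_, _, huA, hlinkeq, ?_⟩
        refine ⟨hed1, hsnm2, hp3, ?_, hans⟩
        refine corr_merge hcorr nb na hnbN hnaN ?_ Rm RM hroot3 ?_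
        · intro k hk
          have := hchar k hk
          rwa [← hnb, ← hna] at this
        · rcases hRmM with ⟨h1, h2⟩ | ⟨h1, h2⟩
          · exact Or.inr ⟨by rw [h1, hRa], by rw [h2, hRb]⟩
          · exact Or.inl ⟨by rw [h1, hRb], by rw [h2, hRa]⟩
      · rw [if_neg hsw]
        obtain ⟨ed1, snm2, huA, hed1, hsnm2, hchar⟩ :=
          unionA_spec ans hed hsnm hra.1 hra.2 hrb.1 hrb.2
            (by rw [← hnb, ← hna, ← heb, ← hea]; exact heq)
        refine ⟨_, _, huA, hlinkeq, ?_⟩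
        refine ⟨hed1, hsnm2, hp3, ?_, hans⟩
        refine corr_merge hcorr na nb hnaN hnbN ?_ Rm RM hroot3 ?_
        · intro k hk
          have := hchar k hk
          rwa [← hnb, ← hna] at this
        · rcases hRmM with ⟨h1, h2⟩ | ⟨h1, h2⟩
          · exact Or.inl ⟨by rw [h1, hRa], by rw [h2, hRb]⟩
          · exact Or.inr ⟨by rw [h1, hRb], by rw [h2, hRa]⟩

theorem fold_equiv {N : Nat} {n : Int} (hn : (N : Int) = n) (rs : List (String × Int × Int))
    (hrs : ∀ r ∈ rs, RangeOK n r) :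
    ∀ stA stB, InvAB N stA stB →
    ∃ stA' stB',
      rs.foldl (fun ost r => ost.bind fun st => stepA st r) (some stA) = some stA' ∧
      rs.foldl (fun ost r => ost.bind fun st => stepB st r) (some stB) = some stB' ∧
      InvAB N stA' stB' := by
  induction rs with
  | nil => exact fun stA stB hI => ⟨stA, stB, rfl, rfl, hI⟩
  | cons r rs ihr =>
    intro stA stB hI
    obtain ⟨stA1, stB1, hA1, hB1, hI1⟩ := step_equiv hn r (hrs r (by simp)) hI
    obtain ⟨stA', stB', hA', hB', hI'⟩ := ihr (fun r' hr' => hrs r' (by simp [hr'])) stA1 stB1 hI1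
    refine ⟨stA', stB', ?_, ?_, hI'⟩
    · rw [List.foldl_cons, Option.bind_some, hA1]
      exact hA'
    · rw [List.foldl_cons, Option.bind_some, hB1]
      exact hB'

theorem root_init {p : List Int} (h : ∀ k, k < p.length → p.getD k 0 = (k : Int)) :
    ∀ z, root p z = z := by
  intro z
  rw [root]
  by_cases hz : z < p.length
  · rw [getD_default_of_lt hz, h z hz]
    simp
  · rw [List.getD_eq_default _ _ (by omega)]
    simp

theorem range_getD {n : Int} (hn0 : 0 ≤ n) :
    (PySem.List.pyRange 0 n 1).length = n.toNat ∧
    ∀ k, k < n.toNat → (PySem.List.pyRange 0 n 1).getD k 0 = (k : Int) := by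
  rw [PySem.List.pyRange_one 0 n]
  constructor
  · simp
  · intro k hk
    rw [List.getD_eq_getElem _ 0 (by simpa using hk)]
    simp

theorem cut_graph_spec_main (n : Int) (m : Int) (e : List (Int × Int))
    (requests : List (String × Int × Int))
    (hpre : ∀ r ∈ requests, RangeOK n r) :
    cut_graph n m e requests = cut_graph_alt n m e requests := by
  by_cases hn0 : 0 ≤ n
  · set N : Nat := n.toNat with hN
    have hn : (N : Int) = n := by omega
    obtain ⟨hlen0, hget0⟩ := range_getD hn0
    set edges0 : List Int := PySem.List.pyRange 0 n 1 with hedges0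
    have hlenN : edges0.length = N := by rw [hlen0]
    have hget0' : ∀ k, k < N → edges0.getD k 0 = (k : Int) := fun k hk => hget0 k hk
    have hsnm0 : edges0.foldl (fun s x => s ++ [[x]]) ([] : List (List Int)) =
        edges0.map (fun x => [x]) := by
      simpa using PySem.List.foldl_append_singleton_eq_map (fun x => [x]) edges0
    have hroot0 : ∀ z, root edges0 z = z := root_init (by rw [hlenN]; exact hget0')
    have hI0 : InvAB N (edges0, edges0.map (fun x => [x]), []) (edges0, []) := by
      refine ⟨⟨hlenN, fun k hk => by rw [hget0' k hk]; omega⟩, ?_, ⟨hlenN, fun k hk => by rw [hget0' k hk]; omega⟩, ?_, rfl⟩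
      · refine ⟨by simp [hlenN], fun l hl => ?_⟩
        have hslot : (edges0.map (fun x => [x])).getD l [] = [(l : Int)] := by
          rw [List.getD_eq_getElem _ [] (by simp; omega), List.getElem_map]
          rw [show edges0[l] = edges0.getD l 0 from (List.getD_eq_getElem edges0 0 (by omega)).symm, hget0' l hl]
        rw [hslot]
        constructor
        · intro x hx
          simp at hx
          omega
        · intro k
          simp only [List.mem_singleton]
          constructor
          · intro hk
            have : k = l := by exact_mod_cast hk
            subst this
            exact ⟨hl, hget0' k hl⟩
          · rintro ⟨hk, hval⟩
            rw [← hval, hget0' k hk]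
      · intro x y hx hy
        rw [hget0' x hx, hget0' y hy, hroot0 x, hroot0 y]
        constructor
        · intro h; exact_mod_cast h
        · intro h; exact_mod_cast h
    obtain ⟨stA', stB', hA', hB', hI'⟩ :=
      fold_equiv hn requests.reverse
        (fun r hr => hpre r (List.mem_reverse.mp hr)) _ _ hI0
    rw [cut_graph, cut_graph_alt]
    rw [← hedges0, hsnm0, hA', hB']
    show stA'.2.2.reverse = stB'.2.reverse
    rw [hI'.2.2.2.2]
  · have hreq : requests = [] := by
      cases requests with
      | nil => rfl
      | cons r rs =>
        exfalso
        have := (hpre r (by simp)).1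
        omega
    subst hreq
    simp [cut_graph, cut_graph_alt]

-- ===== VERDICT (by name: the statement is the Claim_ definition above) =====
theorem cut_graph_spec : Claim_equal_cut_graph := by
  intro n m e requests _hdom hpre
  unfold Spec_cut_graph
  exact cut_graph_spec_main n m e requests (fun r hr => hpre r hr)
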